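-- pv_equiv track=rewrite | github.com/mshukor/xl-vlms | playground/utils.py | keep_first_word_keys
-- ===== SOURCE A (Python) =====
-- def keep_first_word_keys(dict1, dict2):
--     dict1_ = {}
--     dict2_ = {}
--     for k, v in dict1.items():
--         k_ = k.split(" ")[0]
--         if k_ in dict1_:
--             dict1_[k_] += v
--         else:
--             dict1_[k_] = v
--
--         if k in dict2:
--             if k_ in dict2_:
--                 dict2_[k_] += dict2[k]
--             else:
--                 dict2_[k_] = dict2[k]
--
--     return dict1_, dict2_
-- ===== SOURCE B (Python) =====
-- def keep_first_word_keys(dict1, dict2):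
--     # Stage 1: the distinct first words, in order of first appearance
--     # (for the second dict: first appearance among keys also present in dict2).
--     words = []
--     for k in dict1:
--         w = k.split(" ")[0]
--         if w not in words:
--             words.append(w)
--     words2 = []
--     for k in dict1:
--         if k in dict2:
--             w = k.split(" ")[0]
--             if w not in words2:
--                 words2.append(w)
--     # Stage 2: per word, one comprehension summing the matching values.
--     d1 = {w: sum(v for k, v in dict1.items() if k.split(" ")[0] == w) for w in words}
--     d2 = {w: sum(dict2[k] for k in dict1 if k.split(" ")[0] == w and k in dict2)
--           for w in words2}
--     return d1, d2
-- ===== Notes on version B (the rewrite author's own statement) =====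
-- stated objective: alternative
-- what changed: A makes one pass folding sums into two dicts with per-key membership tests; B first collects the ordered lists of distinct first words, then builds each output dict by a comprehension that re-scans dict1 to sum the values matching each word.
import Mathlib
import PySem

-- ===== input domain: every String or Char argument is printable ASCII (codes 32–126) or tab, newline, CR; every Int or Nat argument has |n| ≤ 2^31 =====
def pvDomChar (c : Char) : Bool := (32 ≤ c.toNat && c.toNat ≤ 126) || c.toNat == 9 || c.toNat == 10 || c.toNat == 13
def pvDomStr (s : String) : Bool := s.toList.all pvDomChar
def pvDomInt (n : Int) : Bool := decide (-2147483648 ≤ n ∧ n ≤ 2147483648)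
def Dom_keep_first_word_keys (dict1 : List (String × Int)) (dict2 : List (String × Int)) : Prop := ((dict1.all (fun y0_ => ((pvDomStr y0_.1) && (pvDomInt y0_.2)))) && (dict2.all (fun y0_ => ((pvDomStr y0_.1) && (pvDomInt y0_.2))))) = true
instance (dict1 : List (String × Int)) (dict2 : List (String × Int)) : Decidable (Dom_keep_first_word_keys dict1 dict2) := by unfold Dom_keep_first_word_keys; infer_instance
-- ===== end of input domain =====

-- B replaces A's single inline accumulation pass by a stage that lists the distinct first words and a stage that sums per word by re-scanning (alternative decomposition, no speed claim).


-- ===== PORT A =====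
-- k.split(" ")[0]: the separator " " is nonempty so split? is `some` of a nonempty
-- list; both defaults below are therefore unreachable (exact).
def pvFirstWord (k : String) : String := ((PySem.Str.split? k " ").getD [""]).headD ""

-- one iteration of A's loop body (d2 = the Python dict `dict2`)
def kfwkStepA (d2 : PySem.Dict String Int)
    (st : PySem.Dict String Int × PySem.Dict String Int) (kv : String × Int) :
    PySem.Dict String Int × PySem.Dict String Int :=
  let k_ := pvFirstWord kv.1
  let d1' := match st.1.get? k_ with
    | some old => st.1.insert k_ (old + kv.2)   -- dict1_[k_] += v
    | none => st.1.insert k_ kv.2               -- dict1_[k_] = v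
  let d2' := match d2.get? kv.1 with            -- if k in dict2
    | some dv => match st.2.get? k_ with
      | some old => st.2.insert k_ (old + dv)   -- dict2_[k_] += dict2[k]
      | none => st.2.insert k_ dv               -- dict2_[k_] = dict2[k]
    | none => st.2
  (d1', d2')

-- The Python parameters are dicts; Dict.ofList mirrors Python's dict construction
-- from the association list (later duplicate keys overwrite in place).
def keep_first_word_keys (dict1 : List (String × Int)) (dict2 : List (String × Int)) : (List (String × Int)) × (List (String × Int)) :=
  let r := (PySem.Dict.ofList dict1).items.foldl (kfwkStepA (PySem.Dict.ofList dict2))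
    (PySem.Dict.empty, PySem.Dict.empty)
  (r.1.items, r.2.items)

-- ===== PORT B =====
-- stage 1a: `words` — distinct first words in order of first appearance
def kfwkWords (items : List (String × Int)) : List String :=
  items.foldl (fun ws kv =>
    let w := pvFirstWord kv.1
    if ws.contains w then ws else ws ++ [w]) []

-- stage 1b: `words2` — same, restricted to keys present in dict2
def kfwkWords2 (d2 : PySem.Dict String Int) (items : List (String × Int)) : List String :=
  items.foldl (fun ws kv =>
    if d2.contains kv.1 then
      let w := pvFirstWord kv.1
      if ws.contains w then ws else ws ++ [w]
    else ws) []

-- stage 2: the two dict comprehensions, each re-scanning dict1's items per word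
def keep_first_word_keys_alt (dict1 : List (String × Int)) (dict2 : List (String × Int)) : (List (String × Int)) × (List (String × Int)) :=
  let items := (PySem.Dict.ofList dict1).items
  let d2 := PySem.Dict.ofList dict2
  ((kfwkWords items).map (fun w =>
      (w, ((items.filter (fun kv => pvFirstWord kv.1 == w)).map (·.2)).sum)),
   (kfwkWords2 d2 items).map (fun w =>
      (w, (items.filterMap (fun kv =>
             if pvFirstWord kv.1 == w then d2.get? kv.1 else none)).sum)))

-- ===== PRECONDITION & SPEC =====
def Spec_keep_first_word_keys (dict1 : List (String × Int)) (dict2 : List (String × Int)) (out : (List (String × Int)) × (List (String × Int))) : Prop := out = keep_first_word_keys_alt dict1 dict2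
instance (dict1 : List (String × Int)) (dict2 : List (String × Int)) (out : (List (String × Int)) × (List (String × Int))) : Decidable (Spec_keep_first_word_keys dict1 dict2 out) := by unfold Spec_keep_first_word_keys; infer_instance

-- ===== CLAIM (what is proved, stated in full; the proofs are below) =====
def Claim_equal_keep_first_word_keys : Prop := ∀ (dict1 : List (String × Int)) (dict2 : List (String × Int)), Dom_keep_first_word_keys dict1 dict2 → Spec_keep_first_word_keys dict1 dict2 (keep_first_word_keys dict1 dict2)

-- ===== LEMMAS AND PROOFS =====
-- Abstract view: both components of A's loop are folds of `pvUpsert` over a list of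
-- (word, value) pairs, and B computes the group-sum normal form `pvGSpec` of that list.
def pvUpsert (d : PySem.Dict String Int) (q : String × Int) : PySem.Dict String Int :=
  match d.get? q.1 with
  | some old => d.insert q.1 (old + q.2)
  | none => d.insert q.1 q.2

def pvDW (p : List (String × Int)) : List String :=
  p.foldl (fun ws q => if ws.contains q.1 then ws else ws ++ [q.1]) []

def pvGSum (p : List (String × Int)) (w : String) : Int :=
  ((p.filter (·.1 == w)).map (·.2)).sum

def pvGSpec (p : List (String × Int)) : List (String × Int) :=
  (pvDW p).map (fun w => (w, pvGSum p w))

theorem pvDW_aux_mem (p : List (String × Int)) (x : String) :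
    ∀ ws, (x ∈ p.foldl (fun ws q => if ws.contains q.1 then ws else ws ++ [q.1]) ws
      ↔ x ∈ ws ∨ x ∈ p.map (·.1)) := by
  induction p with
  | nil => intro ws; simp
  | cons q t ih =>
    intro ws
    simp only [List.foldl_cons, List.map_cons, List.mem_cons]
    by_cases h : ws.contains q.1 = true
    · rw [if_pos h, ih]
      have : q.1 ∈ ws := by simpa using h
      constructor
      · rintro (h1 | h1)
        · exact Or.inl h1
        · exact Or.inr (Or.inr h1)
      · rintro (h1 | h1 | h1)
        · exact Or.inl h1
        · exact Or.inl (h1 ▸ this)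
        · exact Or.inr h1
    · rw [if_neg h, ih]
      simp only [List.mem_append, List.mem_singleton]
      tauto

theorem pvDW_mem (p : List (String × Int)) (x : String) :
    x ∈ pvDW p ↔ x ∈ p.map (·.1) := by
  rw [pvDW, pvDW_aux_mem]; simp

theorem pvDW_append (p : List (String × Int)) (q : String × Int) :
    pvDW (p ++ [q]) =
      if (pvDW p).contains q.1 then pvDW p else pvDW p ++ [q.1] := by
  simp [pvDW, List.foldl_append]

theorem pvGSum_append (p : List (String × Int)) (q : String × Int) (w : String) :
    pvGSum (p ++ [q]) w = pvGSum p w + (if q.1 == w then q.2 else 0) := by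
  by_cases h : q.1 = w <;> simp [pvGSum, List.filter_append, h]

theorem pvGSum_of_not_mem (p : List (String × Int)) (w : String)
    (h : w ∉ p.map (·.1)) : pvGSum p w = 0 := by
  have : p.filter (·.1 == w) = [] := by
    rw [List.filter_eq_nil_iff]
    intro a ha
    simp only [beq_iff_eq]
    intro hc
    exact h (List.mem_map.mpr ⟨a, ha, hc⟩)
  simp [pvGSum, this]

-- lookup in a keyed map over a nodup word list
theorem pvGet?_mk_map (ws : List String) (f : String → Int) (x : String)
    (hnd : ws.Nodup) :
    (PySem.Dict.mk (ws.map (fun w => (w, f w)))).get? x =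
      if x ∈ ws then some (f x) else none := by
  induction ws with
  | nil => simp [PySem.Dict.get?]
  | cons w t ih =>
    have hnd' : t.Nodup := hnd.of_cons
    simp only [List.map_cons, PySem.Dict.get?_mk_cons, List.mem_cons]
    by_cases h : w = x
    · subst h
      have : w ∉ t := (List.nodup_cons.mp hnd).1
      simp [this]
    · rw [if_neg (by simpa using h), ih hnd']
      by_cases hx : x ∈ t <;> simp [hx, Ne.symm h]

theorem pvDW_nodup (p : List (String × Int)) : (pvDW p).Nodup := by
  have : ∀ ws : List String, ws.Nodup →
      (p.foldl (fun ws q => if ws.contains q.1 then ws else ws ++ [q.1]) ws).Nodup := by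
    induction p with
    | nil => intro ws h; exact h
    | cons q t ih =>
      intro ws h
      simp only [List.foldl_cons]
      by_cases hc : ws.contains q.1 = true
      · rw [if_pos hc]; exact ih ws h
      · rw [if_neg hc]
        refine ih _ ?_
        have hq : q.1 ∉ ws := by simpa using hc
        simp only [List.nodup_append, List.nodup_singleton, true_and, h]
        intro a ha b hb heq
        rw [List.mem_singleton] at hb
        exact hq (hb ▸ heq ▸ ha)
  exact this [] List.nodup_nil

-- one upsert step turns pvGSpec p into pvGSpec (p ++ [q])
theorem pvUpsert_gspec (p : List (String × Int)) (q : String × Int) :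
    pvUpsert (PySem.Dict.mk (pvGSpec p)) q = PySem.Dict.mk (pvGSpec (p ++ [q])) := by
  have hget : (PySem.Dict.mk (pvGSpec p)).get? q.1 =
      if q.1 ∈ pvDW p then some (pvGSum p q.1) else none :=
    pvGet?_mk_map (pvDW p) (pvGSum p) q.1 (pvDW_nodup p)
  by_cases hm : q.1 ∈ pvDW p
  · -- key seen before: in-place replacement
    have hc : (pvDW p).contains q.1 = true := by simpa using hm
    have hcd : (PySem.Dict.mk (pvGSpec p)).contains q.1 = true := by
      rw [PySem.Dict.contains_eq_isSome_get?, hget, if_pos hm]; rfl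
    rw [pvUpsert, hget, if_pos hm]
    apply PySem.Dict.ext
    rw [PySem.Dict.items_insert_of_contains _ _ hcd]
    show (pvGSpec p).map
        (fun pr => if (pr.1 == q.1) = true then (q.1, pvGSum p q.1 + q.2) else pr) =
      pvGSpec (p ++ [q])
    simp only [pvGSpec, pvDW_append, hc, if_true, List.map_map]
    apply List.map_congr_left
    intro w hw
    by_cases hwq : w = q.1
    · subst hwq; simp [pvGSum_append]
    · simp [pvGSum_append, hwq, Ne.symm hwq]
  · -- new key: appended at the end
    have hc : (pvDW p).contains q.1 = false := by simpa using hm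
    have hcd : (PySem.Dict.mk (pvGSpec p)).contains q.1 = false := by
      rw [PySem.Dict.contains_eq_isSome_get?, hget, if_neg hm]; rfl
    have hnp : q.1 ∉ p.map (·.1) := fun h => hm ((pvDW_mem p q.1).mpr h)
    rw [pvUpsert, hget, if_neg hm]
    apply PySem.Dict.ext
    show ((PySem.Dict.mk (pvGSpec p)).insert q.1 q.2).items = pvGSpec (p ++ [q])
    rw [PySem.Dict.items_insert_of_not_contains _ _ hcd]
    show pvGSpec p ++ [(q.1, q.2)] = pvGSpec (p ++ [q])
    simp only [pvGSpec, pvDW_append, hc, Bool.false_eq_true, if_false, List.map_append,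
      List.map_cons, List.map_nil]
    congr 1
    · apply List.map_congr_left
      intro w hw
      have hwq : ¬ (q.1 == w) = true := by
        simp only [beq_iff_eq]
        intro h; exact hm (h ▸ hw)
      simp [pvGSum_append, hwq]
    · simp [pvGSum_append, pvGSum_of_not_mem p q.1 hnp]

theorem pvFoldl_upsert (p : List (String × Int)) :
    p.foldl pvUpsert PySem.Dict.empty = PySem.Dict.mk (pvGSpec p) := by
  induction p using List.reverseRecOn with
  | nil => rfl
  | append_singleton t q ih =>
    rw [List.foldl_append, List.foldl_cons, List.foldl_nil, ih, pvUpsert_gspec]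

-- A's two accumulators are independent upsert folds over the two pair lists
theorem pvFoldA_split (d2 : PySem.Dict String Int) (l : List (String × Int)) :
    ∀ a b, l.foldl (kfwkStepA d2) (a, b) =
      ((l.map (fun kv => (pvFirstWord kv.1, kv.2))).foldl pvUpsert a,
       (l.filterMap (fun kv => (d2.get? kv.1).map (fun dv => (pvFirstWord kv.1, dv)))).foldl pvUpsert b) := by
  induction l with
  | nil => intro a b; rfl
  | cons kv t ih =>
    intro a b
    simp only [List.foldl_cons, List.map_cons, List.filterMap_cons]
    cases hd : d2.get? kv.1 with
    | none =>
      rw [show kfwkStepA d2 (a, b) kv = (pvUpsert a (pvFirstWord kv.1, kv.2), b) by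
        simp [kfwkStepA, pvUpsert, hd]]
      simpa using ih _ _
    | some dv =>
      rw [show kfwkStepA d2 (a, b) kv =
          (pvUpsert a (pvFirstWord kv.1, kv.2), pvUpsert b (pvFirstWord kv.1, dv)) by
        simp [kfwkStepA, pvUpsert, hd]]
      simpa using ih _ _

-- B's word lists are the distinct-word lists of the two pair lists
theorem pvWords_eq (items : List (String × Int)) :
    kfwkWords items = pvDW (items.map (fun kv => (pvFirstWord kv.1, kv.2))) := by
  simp [kfwkWords, pvDW, List.foldl_map]

theorem pvWords2_eq (d2 : PySem.Dict String Int) (items : List (String × Int)) :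
    kfwkWords2 d2 items =
      pvDW (items.filterMap (fun kv => (d2.get? kv.1).map (fun dv => (pvFirstWord kv.1, dv)))) := by
  have : ∀ ws, items.foldl (fun ws kv =>
      if d2.contains kv.1 then
        (if ws.contains (pvFirstWord kv.1) then ws else ws ++ [pvFirstWord kv.1])
      else ws) ws =
      (items.filterMap (fun kv => (d2.get? kv.1).map (fun dv => (pvFirstWord kv.1, dv)))).foldl
        (fun ws q => if ws.contains q.1 then ws else ws ++ [q.1]) ws := by
    induction items with
    | nil => intro ws; rfl
    | cons kv t ih =>
      intro ws
      simp only [List.foldl_cons, List.filterMap_cons]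
      cases hd : d2.get? kv.1 with
      | none =>
        have hc : d2.contains kv.1 = false := by
          rw [PySem.Dict.contains_eq_isSome_get?, hd]; rfl
        rw [if_neg (by simp [hc])]
        exact ih ws
      | some dv =>
        have hc : d2.contains kv.1 = true := by
          rw [PySem.Dict.contains_eq_isSome_get?, hd]; rfl
        rw [if_pos hc]
        simpa using ih _
  exact this []

-- B's inner sums are the group sums of the two pair lists
theorem pvSum1_eq (items : List (String × Int)) (w : String) :
    ((items.filter (fun kv => pvFirstWord kv.1 == w)).map (·.2)).sum =
      pvGSum (items.map (fun kv => (pvFirstWord kv.1, kv.2))) w := by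
  simp only [pvGSum, List.filter_map, List.map_map]
  rfl

theorem pvSum2_eq (d2 : PySem.Dict String Int) (items : List (String × Int)) (w : String) :
    (items.filterMap (fun kv => if pvFirstWord kv.1 == w then d2.get? kv.1 else none)).sum =
      pvGSum (items.filterMap (fun kv => (d2.get? kv.1).map (fun dv => (pvFirstWord kv.1, dv)))) w := by
  have : items.filterMap (fun kv => if pvFirstWord kv.1 == w then d2.get? kv.1 else none) =
      ((items.filterMap (fun kv => (d2.get? kv.1).map (fun dv => (pvFirstWord kv.1, dv)))).filter
        (·.1 == w)).map (·.2) := by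
    induction items with
    | nil => rfl
    | cons kv t ih =>
      cases hd : d2.get? kv.1 with
      | none =>
        rw [List.filterMap_cons_none (by simp [hd]), List.filterMap_cons_none (by simp [hd])]
        exact ih
      | some dv =>
        by_cases hw : pvFirstWord kv.1 = w
        · simp [hd, hw]
          simpa using ih
        · simp [hd, hw]
          simpa using ih
  rw [pvGSum, this]

-- ===== VERDICT (by name: the statement is the Claim_ definition above) =====
theorem keep_first_word_keys_spec : Claim_equal_keep_first_word_keys := by
  intro dict1 dict2 _
  unfold Spec_keep_first_word_keys
  simp only [keep_first_word_keys, keep_first_word_keys_alt]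
  rw [pvFoldA_split]
  rw [pvFoldl_upsert, pvFoldl_upsert]
  rw [pvWords_eq, pvWords2_eq]
  simp only [pvGSpec]
  congr 1
  · apply List.map_congr_left; intro w _; rw [pvSum1_eq]
  · apply List.map_congr_left; intro w _; rw [pvSum2_eq]
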